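-- pv_equiv track=rewrite | github.com/FF6BeyondChaos/BeyondChaosRandomizer | BeyondChaos/randomtools/utils.py | checksum_mirror_sum
-- ===== SOURCE A (Python) =====
-- def checksum_calc_sum(data, length):
--     return sum(map(int, data[:length]))
--
-- def checksum_mirror_sum(data, length, actual_size, mask=0x80000000):
--     # this is basically an exact copy of the algorithm in snes9x's source
--     while not (actual_size & mask) and mask:
--         mask >>= 1
--     part1 = checksum_calc_sum(data, mask)
--     part2 = 0
--     next_length = actual_size - mask
--     if next_length:
--         part2 = checksum_mirror_sum(data[mask:], next_length, mask >> 1)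
--         while (next_length < mask):
--             next_length += next_length
--             part2 += part2
--     return part1 + part2
-- ===== SOURCE B (Python) =====
-- def checksum_mirror_sum(data, length, actual_size, mask=0x80000000):
--     # iterative: walk the chain with an explicit offset and a running multiplier
--     # instead of recursion with post-hoc doubling of the partial sum
--     total = 0
--     mult = 1
--     off = 0
--     actual = actual_size
--     m = mask
--     while True:
--         s = m
--         while not (actual & s) and s:
--             s >>= 1
--         total += mult * sum(map(int, data[off:off + s]))
--         rem = actual - s
--         if rem == 0:
--             return total
--         factor = 1
--         while rem < s:
--             rem += rem
--             factor += factor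
--         mult *= factor
--         off += s
--         actual = s >> 1
--         m = 0x80000000
-- ===== Notes on version B (the rewrite author's own statement) =====
-- stated objective: alternative
-- what changed: Replaces A's recursion (which computes the deeper partial sum first and then doubles it in a post-hoc while loop) with a single iterative loop that walks the data with an explicit offset and folds the doubling into a running multiplier applied as each chunk is summed.
import Mathlib
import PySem

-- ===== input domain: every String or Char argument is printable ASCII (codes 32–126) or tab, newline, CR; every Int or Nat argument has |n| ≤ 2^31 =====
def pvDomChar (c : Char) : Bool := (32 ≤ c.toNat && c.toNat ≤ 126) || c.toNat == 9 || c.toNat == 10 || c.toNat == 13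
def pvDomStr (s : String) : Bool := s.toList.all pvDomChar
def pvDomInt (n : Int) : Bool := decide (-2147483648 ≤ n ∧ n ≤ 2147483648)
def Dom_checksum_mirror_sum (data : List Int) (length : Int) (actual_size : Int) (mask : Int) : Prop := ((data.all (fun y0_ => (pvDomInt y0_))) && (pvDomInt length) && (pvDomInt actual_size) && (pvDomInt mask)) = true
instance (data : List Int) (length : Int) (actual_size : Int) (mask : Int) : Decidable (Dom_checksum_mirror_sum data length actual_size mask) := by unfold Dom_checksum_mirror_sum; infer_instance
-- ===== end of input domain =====

-- B replaces A's recursion (which doubles the recursive partial sum after the fact) by a single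
-- loop walking the data with an explicit offset and a running multiplier; same return value on Pre_.

-- ===== PORT A =====
-- while not (actual_size & mask) and mask: mask >>= 1
-- (the extra 'm = -1' stop is reached only when actual_size = 0 and mask < 0, where Python loops forever)
def shiftA (a m : Int) : Int :=
  if PySem.Int.band a m ≠ 0 ∨ m = 0 ∨ m = -1 then m else shiftA a (m >>> (1 : Nat))
termination_by m.natAbs
decreasing_by
  simp only [Int.shiftRight_eq_div_pow, pow_one]
  omega

def checksum_calc_sum (data : List Int) (length : Int) : Int :=
  (PySem.List.slice data none (some length)).sum

-- while next_length < mask: next_length += next_length; part2 += part2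
-- (the 'next_length ≤ 0' stop is reached only where Python loops forever)
def doubleA (next_length part2 m : Int) : Int :=
  if next_length < m then
    (if next_length ≤ 0 then part2 else doubleA (next_length + next_length) (part2 + part2) m)
  else part2
termination_by (m - next_length).toNat
decreasing_by omega

-- fuel 5: the recursive call always passes mask = 2^31, which bounds the real recursion depth by 3;
-- the fuel is never exhausted on an input where the Python returns.
def cmsA : Nat → List Int → Int → Int → Int → Int
  | 0, _, _, _, _ => 0
  | fuel + 1, data, _length, actual_size, mask =>
    let m := shiftA actual_size mask
    let part1 := checksum_calc_sum data m
    let next := actual_size - m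
    part1 + (if next = 0 then 0
             else doubleA next
                    (cmsA fuel (PySem.List.slice data (some m) none) next (m >>> (1 : Nat)) 2147483648) m)

def checksum_mirror_sum (data : List Int) (length : Int) (actual_size : Int) (mask : Int) : Int :=
  cmsA 5 data length actual_size mask

-- ===== PORT B =====
def bShift (a m : Int) : Int :=
  if PySem.Int.band a m ≠ 0 ∨ m = 0 ∨ m = -1 then m else bShift a (m >>> (1 : Nat))
termination_by m.natAbs
decreasing_by
  simp only [Int.shiftRight_eq_div_pow, pow_one]
  omega

-- factor = 1; while rem < s: rem += rem; factor += factor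
def bFactor (rem factor m : Int) : Int :=
  if rem < m then (if rem ≤ 0 then factor else bFactor (rem + rem) (factor + factor) m)
  else factor
termination_by (m - rem).toNat
decreasing_by omega

-- the while-True loop of Source B; same fuel bound as the A side
def bLoop : Nat → List Int → Int → Int → Int → Int → Int → Int
  | 0, _, _, _, _, _, total => total
  | fuel + 1, data, off, actual, m, mult, total =>
    let s := bShift actual m
    let total' := total + mult * (PySem.List.slice data (some off) (some (off + s))).sum
    let rem := actual - s
    if rem = 0 then total'
    else bLoop fuel data (off + s) (s >>> (1 : Nat)) 2147483648 (mult * bFactor rem 1 s) total'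

def checksum_mirror_sum_alt (data : List Int) (length : Int) (actual_size : Int) (mask : Int) : Int :=
  bLoop 5 data 0 actual_size mask 1 0

-- ===== PRECONDITION & SPEC =====
-- Pre_ is exactly A's termination set: A returns iff either (left disjunct) actual_size and mask are
-- nonnegative and every right-shift of mask that is still larger than actual_size shares no bit with
-- it (so the effective mask ends up <= actual_size), or (right disjunct) some right-shift of mask
-- equals actual_size with all earlier shifts sharing no bit with it (the loop stops exactly there).
-- Outside this set A's shift loop, doubling loop or recursion never ends (infinite loop /
-- RecursionError), so Pre_ excludes no input on which A returns.
def Pre_checksum_mirror_sum (data : List Int) (length : Int) (actual_size : Int) (mask : Int) : Prop :=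
  (0 <= actual_size ∧ 0 <= mask ∧
    ∀ k : Nat, k < 64 → actual_size < (mask >>> k) → PySem.Int.band actual_size (mask >>> k) = 0)
  ∨ (∃ k : Nat, k < 64 ∧ (mask >>> k) = actual_size ∧
      ∀ j : Nat, j < k → PySem.Int.band actual_size (mask >>> j) = 0)

instance (data : List Int) (length : Int) (actual_size : Int) (mask : Int) : Decidable (Pre_checksum_mirror_sum data length actual_size mask) := by unfold Pre_checksum_mirror_sum; infer_instance

def pvWitness_checksum_mirror_sum : List Int × Int × Int × Int := ([1, 2, 3], 0, 3, 2147483648)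

def Spec_checksum_mirror_sum (data : List Int) (length : Int) (actual_size : Int) (mask : Int) (out : Int) : Prop := out = checksum_mirror_sum_alt data length actual_size mask
instance (data : List Int) (length : Int) (actual_size : Int) (mask : Int) (out : Int) : Decidable (Spec_checksum_mirror_sum data length actual_size mask out) := by unfold Spec_checksum_mirror_sum; infer_instance

-- ===== CLAIM (what is proved, stated in full; the proofs are below) =====
def Claim_equal_checksum_mirror_sum : Prop := ∀ (data : List Int) (length : Int) (actual_size : Int) (mask : Int), Dom_checksum_mirror_sum data length actual_size mask → Pre_checksum_mirror_sum data length actual_size mask → Spec_checksum_mirror_sum data length actual_size mask (checksum_mirror_sum data length actual_size mask)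

-- ===== LEMMAS AND PROOFS =====
theorem bShift_eq_shiftA (a m : Int) : bShift a m = shiftA a m := by
  fun_induction bShift a m with
  | case1 m h => rw [shiftA, if_pos h]
  | case2 m h ih => rw [shiftA, if_neg h]; exact ih

theorem shiftA_fixed : ∀ (k : Nat) (a m : Int), m >>> k = a →
    (∀ j : Nat, j < k → PySem.Int.band a (m >>> j) = 0) → shiftA a m = a := by
  intro k
  induction k with
  | zero =>
    intro a m h _
    simp only [Int.shiftRight_zero] at h
    subst h
    have hcond : PySem.Int.band m m ≠ 0 ∨ m = 0 ∨ m = -1 := by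
      rw [PySem.Int.band_self]
      by_cases h0 : m = 0
      · exact Or.inr (Or.inl h0)
      · exact Or.inl h0
    rw [shiftA, if_pos hcond]
  | succ k ih =>
    intro a m h hj
    have hb0 : PySem.Int.band a m = 0 := by
      have := hj 0 (Nat.succ_pos k)
      simpa using this
    by_cases hm0 : m = 0
    · subst hm0
      have ha : a = 0 := by
        have h0 : (0 : Int) >>> (k + 1) = 0 := by
          simp [Int.shiftRight_eq_div_pow]
        rw [h0] at h
        omega
      rw [shiftA]
      simp [ha]
    · by_cases hm1 : m = -1
      · exfalso
        subst hm1
        have ha : a = 0 := by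
          have := PySem.Int.band_neg_one a
          omega
        have hneg : (-1 : Int) >>> (k + 1) < 0 := by
          rw [Int.shiftRight_eq_div_pow, Int.ediv_lt_iff_lt_mul (by positivity)]
          omega
        omega
      · rw [shiftA, if_neg (by push Not; exact ⟨by simpa using hb0, hm0, hm1⟩)]
        apply ih a (m >>> (1 : Nat))
        · rw [← Int.shiftRight_add]
          have hadd : 1 + k = k + 1 := Nat.add_comm 1 k
          rw [hadd]
          exact h
        · intro j hjk
          have hstep := hj (j + 1) (by omega)
          rw [← Int.shiftRight_add]
          have hadd : 1 + j = j + 1 := Nat.add_comm 1 j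
          rw [hadd]
          exact hstep

theorem shiftA_nonneg (a m : Int) (hm : 0 ≤ m) : 0 ≤ shiftA a m := by
  fun_induction shiftA a m with
  | case1 m h => exact hm
  | case2 m h ih =>
    apply ih
    simp only [Int.shiftRight_eq_div_pow]
    omega

theorem bFactor_mul (r f m : Int) : ∀ c : Int, bFactor r (c * f) m = c * bFactor r f m := by
  fun_induction bFactor r f m with
  | case1 r f h1 h2 =>
    intro c
    rw [bFactor, if_pos h1, if_pos h2]
  | case2 r f h1 h2 ih =>
    intro c
    rw [bFactor, if_pos h1, if_neg h2]
    have hc : c * f + c * f = c * (f + f) := by ring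
    rw [hc, ih c]
  | case3 r f h1 =>
    intro c
    rw [bFactor, if_neg h1]

theorem bFactor_scale (r f m : Int) : bFactor r f m = f * bFactor r 1 m := by
  have h := bFactor_mul r 1 m f
  simpa using h

theorem doubleA_eq_bFactor (n p m : Int) : doubleA n p m = p * bFactor n 1 m := by
  fun_induction doubleA n p m with
  | case1 n p h1 h2 => rw [bFactor, if_pos h1, if_pos h2]; ring
  | case2 n p h1 h2 ih =>
    rw [ih]
    have h3 : bFactor n 1 m = (1 + 1) * bFactor (n + n) 1 m := by
      rw [bFactor, if_pos h1, if_neg h2, bFactor_scale]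
    rw [h3]
    ring
  | case3 n p h1 => rw [bFactor, if_neg h1]; ring

theorem slice_split (data : List Int) (off s : Int) (h1 : 0 ≤ off) (h2 : 0 ≤ s) :
    PySem.List.slice data (some off) (some (off + s)) =
      PySem.List.slice (PySem.List.slice data (some off)) none (some s) := by
  rw [PySem.List.slice_toNat data h1 (by omega), PySem.List.slice_from data h1,
      PySem.List.slice_to _ h2]
  congr 1
  omega

theorem slice_drop_drop (data : List Int) (off s : Int) (h1 : 0 ≤ off) (h2 : 0 ≤ s) :
    PySem.List.slice (PySem.List.slice data (some off)) (some s) =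
      PySem.List.slice data (some (off + s)) := by
  rw [PySem.List.slice_from data h1, PySem.List.slice_from _ h2,
      PySem.List.slice_from data (by omega : (0:Int) ≤ off + s), List.drop_drop]
  congr 1
  omega

theorem bLoop_eq_cmsA (fuel : Nat) :
    ∀ (data : List Int) (length off a m mult total : Int), 0 ≤ off →
      (0 ≤ m ∨ (off = 0 ∧ a = shiftA a m)) →
      bLoop fuel data off a m mult total =
        total + mult * cmsA fuel (PySem.List.slice data (some off)) length a m := by
  induction fuel with
  | zero => intro data length off a m mult total _ _; simp [bLoop, cmsA]
  | succ fuel ih =>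
    intro data length off a m mult total hoff hm
    rw [bLoop, cmsA]
    have hsb : bShift a m = shiftA a m := bShift_eq_shiftA a m
    simp only [hsb, checksum_calc_sum]
    by_cases hrem : a - shiftA a m = 0
    · simp only [hrem, if_true]
      have hslice : PySem.List.slice data (some off) (some (off + shiftA a m)) =
          PySem.List.slice (PySem.List.slice data (some off)) none (some (shiftA a m)) := by
        rcases hm with hm | ⟨hz, _⟩
        · exact slice_split data off _ hoff (shiftA_nonneg a m hm)
        · subst hz
          simp [PySem.List.slice_zero_start]
      rw [hslice]; ring
    · have hm0 : 0 ≤ m := by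
        rcases hm with hm | ⟨_, ha⟩
        · exact hm
        · omega
      have hs : 0 ≤ shiftA a m := shiftA_nonneg a m hm0
      simp only [hrem, if_false]
      rw [ih data (a - shiftA a m) (off + shiftA a m) (shiftA a m >>> (1 : Nat)) 2147483648
            (mult * bFactor (a - shiftA a m) 1 (shiftA a m)) _ (by omega) (Or.inl (by norm_num))]
      rw [slice_drop_drop data off _ hoff hs]
      rw [slice_split data off _ hoff hs]
      rw [doubleA_eq_bFactor]
      ring

-- ===== VERDICT (by name: the statement is the Claim_ definition above) =====
theorem checksum_mirror_sum_spec : Claim_equal_checksum_mirror_sum := by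
  intro data length actual_size mask _ hpre
  unfold Spec_checksum_mirror_sum checksum_mirror_sum checksum_mirror_sum_alt
  have hm : (0 : Int) ≤ mask ∨ ((0 : Int) = 0 ∧ actual_size = shiftA actual_size mask) := by
    rcases hpre with ⟨_, hm, _⟩ | ⟨k, _, hka, hkj⟩
    · exact Or.inl hm
    · exact Or.inr ⟨rfl, (shiftA_fixed k actual_size mask hka hkj).symm⟩
  rw [bLoop_eq_cmsA 5 data length 0 actual_size mask 1 0 le_rfl hm]
  simp [PySem.List.slice_zero_start, PySem.List.slice_none_none]
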